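-- pv_equiv track=rewrite | github.com/hazardscarn/energyagentai | marketing_agent/agent.py | _parse_social_content
-- ===== SOURCE A (Python) =====
-- from typing import Optional, Dict, Any
--
-- def _parse_social_content(content: str) -> Dict:
--     """Parse social media content into structured format"""
--     sections = {}
--     lines = content.split('\n')
--     current_section = "full_content"
--     current_text = []
--
--     indicators = ['main post:', 'hashtags:', 'platform adaptation:', 'engagement strategy:']
--
--     for line in lines:
--         line_clean = line.strip()
--         if not line_clean:
--             continue
--
--         line_lower = line_clean.lower()
--         is_section = any(indicator in line_lower for indicator in indicators)
--
--         if is_section: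
--             if current_text:
--                 sections[current_section] = '\n'.join(current_text)
--             current_section = line_lower.replace(':', '').strip().replace(' ', '_')
--             current_text = []
--         else:
--             current_text.append(line_clean)
--
--     if current_text:
--         sections[current_section] = '\n'.join(current_text)
--
--     sections["full_content"] = content
--     return sections
-- ===== SOURCE B (Python) =====
-- def _parse_social_content(content: str) -> dict:
--     """Parse social media content into structured format.
--
--     Header-segment decomposition: first normalize to the non-blank stripped
--     lines, then split them into a leading body and (header, body) groups,
--     and finally build the dict from those groups.
--     """
--     indicators = ['main post:', 'hashtags:', 'platform adaptation:', 'engagement strategy:']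
--
--     def is_header(line):
--         low = line.lower()
--         return any(ind in low for ind in indicators)
--
--     lines = [s for s in (ln.strip() for ln in content.split('\n')) if s]
--
--     # leading body lines before the first header
--     i = 0
--     lead = []
--     while i < len(lines) and not is_header(lines[i]):
--         lead.append(lines[i])
--         i += 1
--
--     # (header, body-lines) groups
--     groups = []
--     while i < len(lines):
--         h = lines[i]
--         i += 1
--         body = []
--         while i < len(lines) and not is_header(lines[i]):
--             body.append(lines[i])
--             i += 1
--         groups.append((h, body))
--
--     sections = {}
--     if lead:
--         sections['full_content'] = '\n'.join(lead)
--     for h, body in groups: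
--         if body:
--             key = h.lower().replace(':', '').strip().replace(' ', '_')
--             sections[key] = '\n'.join(body)
--     sections['full_content'] = content
--     return sections
-- ===== Notes on version B (the rewrite author's own statement) =====
-- stated objective: alternative
-- what changed: B replaces A's single-pass accumulator state machine (current_section/current_text carried across lines) with a header-segment decomposition: it first normalizes to the non-blank stripped lines, splits them into a leading body and (header, body-lines) groups, and then builds the dict from those groups.
import Mathlib
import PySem

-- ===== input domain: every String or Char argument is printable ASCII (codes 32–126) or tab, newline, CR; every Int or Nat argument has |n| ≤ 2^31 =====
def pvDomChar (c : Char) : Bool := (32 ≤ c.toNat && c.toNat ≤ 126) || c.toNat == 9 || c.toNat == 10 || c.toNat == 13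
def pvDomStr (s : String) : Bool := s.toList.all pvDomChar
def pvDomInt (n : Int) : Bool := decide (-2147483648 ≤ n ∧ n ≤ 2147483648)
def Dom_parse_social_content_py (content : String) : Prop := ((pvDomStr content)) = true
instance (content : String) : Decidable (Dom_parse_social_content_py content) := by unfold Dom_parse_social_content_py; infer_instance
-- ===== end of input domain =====

-- B re-groups the cleaned lines into header segments instead of running A's accumulator
-- state machine; same return value (alternative decomposition, no speed claim).

-- ===== PORT A =====
def pvIndicators : List String := ["main post:", "hashtags:", "platform adaptation:", "engagement strategy:"]

-- one iteration of A's for-loop (state: sections, current_section, current_text)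
def pvStepA (st : PySem.Dict String String × String × List String) (line : String) :
    PySem.Dict String String × String × List String :=
  let (sections, current_section, current_text) := st
  let line_clean := PySem.Str.strip line
  if line_clean = "" then st
  else
    let line_lower := PySem.Str.lower line_clean
    let is_section := pvIndicators.any (fun ind => PySem.Str.isIn ind line_lower)
    if is_section then
      let sections := if current_text ≠ [] then
          sections.insert current_section (PySem.Str.join "\n" current_text) else sections
      (sections, PySem.Str.replace (PySem.Str.strip (PySem.Str.replace line_lower ":" "")) " " "_", [])
    else
      (sections, current_section, current_text ++ [line_clean])

def parse_social_content_py (content : String) : List (String × String) :=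
  let lines := (PySem.Chars.splitOn content.toList ['\n']).map String.ofList
  let st := lines.foldl pvStepA (PySem.Dict.empty, "full_content", [])
  let (sections, current_section, current_text) := st
  let sections := if current_text ≠ [] then
      sections.insert current_section (PySem.Str.join "\n" current_text) else sections
  (sections.insert "full_content" content).items

-- ===== PORT B =====
def pvIsHeader (line : String) : Bool :=
  pvIndicators.any (fun ind => PySem.Str.isIn ind (PySem.Str.lower line))

def pvKeyOf (h : String) : String :=
  PySem.Str.replace (PySem.Str.strip (PySem.Str.replace (PySem.Str.lower h) ":" "")) " " "_"

-- the inner while loops of Source B: collect body lines up to the next header, recurse past it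
def pvGroups : List String → List (String × List String)
  | [] => []
  | h :: t =>
      (h, t.takeWhile (fun l => !pvIsHeader l)) :: pvGroups (t.dropWhile (fun l => !pvIsHeader l))
termination_by l => l.length
decreasing_by simpa using Nat.lt_succ_of_le (List.length_dropWhile_le _ _)

def pvInsGroup (d : PySem.Dict String String) (g : String × List String) : PySem.Dict String String :=
  if g.2 ≠ [] then d.insert (pvKeyOf g.1) (PySem.Str.join "\n" g.2) else d

def parse_social_content_py_alt (content : String) : List (String × String) :=
  let lines := (((PySem.Chars.splitOn content.toList ['\n']).map String.ofList).map PySem.Str.strip).filter (fun s => s ≠ "")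
  let lead := lines.takeWhile (fun l => !pvIsHeader l)
  let rest := lines.dropWhile (fun l => !pvIsHeader l)
  let sections : PySem.Dict String String :=
    if lead ≠ [] then PySem.Dict.empty.insert "full_content" (PySem.Str.join "\n" lead)
    else PySem.Dict.empty
  let sections := (pvGroups rest).foldl pvInsGroup sections
  (sections.insert "full_content" content).items

-- ===== PRECONDITION & SPEC =====
def Spec_parse_social_content_py (content : String) (out : List (String × String)) : Prop := out = parse_social_content_py_alt content
instance (content : String) (out : List (String × String)) : Decidable (Spec_parse_social_content_py content out) := by unfold Spec_parse_social_content_py; infer_instance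

-- ===== CLAIM (what is proved, stated in full; the proofs are below) =====
def Claim_equal_parse_social_content_py : Prop := ∀ (content : String), Dom_parse_social_content_py content → Spec_parse_social_content_py content (parse_social_content_py content)

-- ===== LEMMAS AND PROOFS =====

-- A's step on an already-stripped non-blank line
def pvCleanStep (st : PySem.Dict String String × String × List String) (l : String) :
    PySem.Dict String String × String × List String :=
  let (sections, current_section, current_text) := st
  if pvIsHeader l then
    let sections := if current_text ≠ [] then
        sections.insert current_section (PySem.Str.join "\n" current_text) else sections
    (sections, pvKeyOf l, [])
  else
    (sections, current_section, current_text ++ [l])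

lemma pvStepA_eq (st : PySem.Dict String String × String × List String) (line : String) :
    pvStepA st line =
      if PySem.Str.strip line = "" then st else pvCleanStep st (PySem.Str.strip line) := by
  obtain ⟨d, cs, ct⟩ := st
  simp only [pvStepA, pvCleanStep, pvIsHeader, pvKeyOf]

lemma pvFoldA_eq (lines : List String) (st : PySem.Dict String String × String × List String) :
    lines.foldl pvStepA st =
      ((lines.map PySem.Str.strip).filter (fun s => s ≠ "")).foldl pvCleanStep st := by
  induction lines generalizing st with
  | nil => rfl
  | cons l t ih =>
      simp only [List.foldl_cons, List.map_cons, List.filter_cons, pvStepA_eq]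
      by_cases h : PySem.Str.strip l = "" <;> simp [h, ih]

lemma pvGroups_cons (h : String) (t : List String) :
    pvGroups (h :: t) =
      (h, t.takeWhile (fun l => !pvIsHeader l)) :: pvGroups (t.dropWhile (fun l => !pvIsHeader l)) := by
  rw [pvGroups]

def pvFinish (st : PySem.Dict String String × String × List String) : PySem.Dict String String :=
  if st.2.2 ≠ [] then st.1.insert st.2.1 (PySem.Str.join "\n" st.2.2) else st.1

lemma pvLoop_groups (L : List String) :
    ∀ (d : PySem.Dict String String) (cs : String) (ct : List String),
    pvFinish (L.foldl pvCleanStep (d, cs, ct)) =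
      (pvGroups (L.dropWhile (fun l => !pvIsHeader l))).foldl pvInsGroup
        (if ct ++ L.takeWhile (fun l => !pvIsHeader l) ≠ [] then
            d.insert cs (PySem.Str.join "\n" (ct ++ L.takeWhile (fun l => !pvIsHeader l)))
          else d) := by
  induction L with
  | nil => intro d cs ct; simp [pvGroups, pvFinish]
  | cons l t ih =>
      intro d cs ct
      by_cases h : pvIsHeader l
      · have hstep : pvCleanStep (d, cs, ct) l =
            ((if ct ≠ [] then d.insert cs (PySem.Str.join "\n" ct) else d), pvKeyOf l, []) := by
          simp [pvCleanStep, h]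
        have htw : List.takeWhile (fun l => !pvIsHeader l) (l :: t) = [] := by
          simp [h]
        have hdw : List.dropWhile (fun l => !pvIsHeader l) (l :: t) = l :: t := by
          simp [h]
        rw [List.foldl_cons, hstep, ih, htw, hdw, pvGroups_cons, List.foldl_cons]
        simp only [List.nil_append, List.append_nil, pvInsGroup]
      · have hstep : pvCleanStep (d, cs, ct) l = (d, cs, ct ++ [l]) := by
          simp [pvCleanStep, h]
        have htw : List.takeWhile (fun l => !pvIsHeader l) (l :: t) =
            l :: List.takeWhile (fun l => !pvIsHeader l) t := by
          simp [h]
        have hdw : List.dropWhile (fun l => !pvIsHeader l) (l :: t) =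
            List.dropWhile (fun l => !pvIsHeader l) t := by
          simp [h]
        rw [List.foldl_cons, hstep, ih, htw, hdw]
        simp

-- ===== VERDICT (by name: the statement is the Claim_ definition above) =====
theorem parse_social_content_py_spec : Claim_equal_parse_social_content_py := by
  intro content _
  show parse_social_content_py content = parse_social_content_py_alt content
  unfold parse_social_content_py parse_social_content_py_alt
  dsimp only
  rw [pvFoldA_eq]
  rcases hst : List.foldl pvCleanStep (PySem.Dict.empty, "full_content", [])
      (List.filter (fun s => decide (s ≠ ""))
        (List.map PySem.Str.strip
          (List.map String.ofList (PySem.Chars.splitOn content.toList ['\n'])))) with ⟨a, b, c⟩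
  have key := pvLoop_groups
      (List.filter (fun s => decide (s ≠ ""))
        (List.map PySem.Str.strip
          (List.map String.ofList (PySem.Chars.splitOn content.toList ['\n']))))
      PySem.Dict.empty "full_content" []
  rw [hst] at key
  simp only [pvFinish, List.nil_append] at key
  dsimp only at key ⊢
  rw [key]
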